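-- pv_equiv track=rewrite | github.com/SadriddinDev/BinarySearch | Problems/Easy/954.py | solve
-- ===== SOURCE A (Python) =====
-- def solve(nums):
--     c = 0
--     l = None
--     for i in nums:
--         if i == 1:
--             if l != 1:
--                 c+=1
--                 l = 1
--                 if c > 1:
--                     return False
--         l = i
--     return c == 1
-- ===== SOURCE B (Python) =====
-- def solve(nums):
--     i = 0
--     n = len(nums)
--     # phase 1: skip the prefix before the first 1
--     while i < n and nums[i] != 1:
--         i += 1
--     if i == n:
--         return False
--     # phase 2: consume the block of ones
--     while i < n and nums[i] == 1:
--         i += 1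
--     # phase 3: no further 1 may occur
--     while i < n:
--         if nums[i] == 1:
--             return False
--         i += 1
--     return True
-- ===== Notes on version B (the rewrite author's own statement) =====
-- stated objective: alternative
-- what changed: Replaces A's single state-machine pass that counts run starts (carrying previous element and a counter) with three stateless sequential phases: skip prefix before the first 1, consume the block of ones, then verify no further 1 occurs.
import Mathlib
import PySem

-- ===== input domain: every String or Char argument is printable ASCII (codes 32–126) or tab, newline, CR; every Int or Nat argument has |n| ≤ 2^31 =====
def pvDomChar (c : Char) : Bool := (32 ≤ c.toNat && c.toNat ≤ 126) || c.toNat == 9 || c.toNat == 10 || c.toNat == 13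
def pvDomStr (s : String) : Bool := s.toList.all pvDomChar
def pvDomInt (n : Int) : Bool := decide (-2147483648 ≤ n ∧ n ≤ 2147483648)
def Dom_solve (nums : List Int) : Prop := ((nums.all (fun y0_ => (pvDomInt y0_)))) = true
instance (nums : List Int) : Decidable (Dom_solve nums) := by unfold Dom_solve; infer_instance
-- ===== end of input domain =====

-- B replaces A's counting state machine by three sequential index phases (skip prefix, consume the one-block, verify no later 1); alternative algorithm, same cost.


-- ===== PORT A =====
-- literal port of A's for-loop over nums with state c (run counter) and l (previous element, None initially)
def solveLoop (nums : List Int) (c : Int) (l : Option Int) : Bool :=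
  match nums with
  | [] => c == 1
  | i :: rest =>
    if i == 1 then
      if l != some 1 then
        if c + 1 > 1 then false
        else solveLoop rest (c + 1) (some i)
      else solveLoop rest c (some i)
    else solveLoop rest c (some i)

def solve (nums : List Int) : Bool := solveLoop nums 0 none

-- ===== PORT B =====
-- phase 1 of Source B: while i < n and nums[i] != 1: i += 1   (returns the final i)
def phase1 (nums : List Int) (n i : Nat) : Nat :=
  if h : i < n then
    if nums.getD i 0 != 1 then phase1 nums n (i + 1) else i
  else i
termination_by n - i

-- phase 2 of Source B: while i < n and nums[i] == 1: i += 1   (returns the final i)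
def phase2 (nums : List Int) (n i : Nat) : Nat :=
  if h : i < n then
    if nums.getD i 0 == 1 then phase2 nums n (i + 1) else i
  else i
termination_by n - i

-- phase 3 of Source B: while i < n: if nums[i] == 1: return False; i += 1; return True
def phase3 (nums : List Int) (n i : Nat) : Bool :=
  if h : i < n then
    if nums.getD i 0 == 1 then false else phase3 nums n (i + 1)
  else true
termination_by n - i

def solve_alt (nums : List Int) : Bool :=
  let n := nums.length
  let i := phase1 nums n 0
  if i == n then false
  else phase3 nums n (phase2 nums n i)

-- ===== PRECONDITION & SPEC =====
def Spec_solve (nums : List Int) (out : Bool) : Prop := out = solve_alt nums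
instance (nums : List Int) (out : Bool) : Decidable (Spec_solve nums out) := by unfold Spec_solve; infer_instance

-- ===== CLAIM (what is proved, stated in full; the proofs are below) =====
def Claim_equal_solve : Prop := ∀ (nums : List Int), Dom_solve nums → Spec_solve nums (solve nums)

-- ===== LEMMAS AND PROOFS =====

-- number of maximal runs of 1s in the list, given whether the previous element was 1
def runsB (b : Bool) (nums : List Int) : Nat :=
  match nums with
  | [] => 0
  | i :: rest => (if i = 1 ∧ b = false then 1 else 0) + runsB (i == 1) rest

theorem solveLoop_eq (nums : List Int) : ∀ (c : Int) (l : Option Int), 0 ≤ c → c ≤ 1 →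
    solveLoop nums c l = decide (c + (runsB (l == some 1) nums : Int) = 1) := by
  induction nums with
  | nil =>
    intro c l _ _
    by_cases h : c = 1 <;> simp [solveLoop, runsB, h]
  | cons i rest ih =>
    intro c l h0 h1
    by_cases hi : i = 1
    · subst hi
      by_cases hl : l = some 1
      · subst hl
        simp only [solveLoop, runsB]
        rw [if_pos (by simp), if_neg (by simp)]
        rw [ih c (some 1) h0 h1]
        simp
      · have hne : (l != some (1 : Int)) = true := by
          cases l with
          | none => rfl
          | some x => simp_all
        have hlb : (l == some (1 : Int)) = false := by
          cases l with
          | none => rfl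
          | some x => simp_all
        simp only [solveLoop, runsB, hlb]
        rw [if_pos (by simp), if_pos hne]
        by_cases hc : c + 1 > 1
        · have hc1 : c = 1 := by omega
          subst hc1
          rw [if_pos hc]
          rw [eq_comm, decide_eq_false_iff_not]
          simp only [and_self, if_true]
          push_cast
          omega
        · have hc0 : c = 0 := by omega
          subst hc0
          rw [if_neg hc]
          rw [ih (0 + 1) (some 1) (by omega) (by omega)]
          rw [decide_eq_decide]
          have hb : (some (1:Int) == some (1:Int)) = true := by decide
          rw [hb]
          simp only [and_self, if_true]
          push_cast
          omega
    · have hib : (i == (1 : Int)) = false := by simp [hi]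
      simp only [solveLoop, runsB, hib]
      rw [if_neg (by simp [hi])]
      rw [ih c (some i) h0 h1]
      have hsb : (some i == some (1 : Int)) = false := by simp [hi]
      rw [hsb]
      simp [hi]

theorem phase3_eq (nums : List Int) (i : Nat) :
    phase3 nums nums.length i = decide (runsB false (nums.drop i) = 0) := by
  by_cases h : i < nums.length
  · rw [phase3, dif_pos h]
    have hd : nums.drop i = nums[i] :: nums.drop (i + 1) := List.drop_eq_getElem_cons h
    have hg : nums.getD i 0 = nums[i] := List.getD_eq_getElem nums 0 h
    rw [hg, hd]
    by_cases h1 : nums[i] = (1 : Int)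
    · rw [if_pos (by simp [h1])]
      rw [eq_comm, decide_eq_false_iff_not]
      simp only [runsB, h1]
      simp
    · rw [if_neg (by simp [h1])]
      rw [phase3_eq nums (i + 1)]
      rw [decide_eq_decide]
      simp only [runsB]
      rw [show (nums[i] == (1:Int)) = false from by simp [h1]]
      simp [h1]
  · rw [phase3, dif_neg h]
    rw [List.drop_eq_nil_of_le (by omega)]
    simp [runsB]
termination_by nums.length - i

theorem phase2_eq (nums : List Int) (i : Nat) :
    phase3 nums nums.length (phase2 nums nums.length i) = decide (runsB true (nums.drop i) = 0) := by
  by_cases h : i < nums.length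
  · rw [phase2, dif_pos h]
    have hd : nums.drop i = nums[i] :: nums.drop (i + 1) := List.drop_eq_getElem_cons h
    have hg : nums.getD i 0 = nums[i] := List.getD_eq_getElem nums 0 h
    rw [hg]
    by_cases h1 : nums[i] = (1 : Int)
    · rw [if_pos (by simp [h1])]
      rw [phase2_eq nums (i + 1)]
      rw [decide_eq_decide, hd]
      simp only [runsB]
      simp [h1]
    · rw [if_neg (by simp [h1])]
      rw [phase3_eq nums i]
      rw [decide_eq_decide, hd]
      simp only [runsB]
      rw [show (nums[i] == (1:Int)) = false from by simp [h1]]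
      simp [h1]
  · rw [phase2, dif_neg h]
    rw [phase3, dif_neg h]
    rw [List.drop_eq_nil_of_le (by omega)]
    simp [runsB]
termination_by nums.length - i

theorem phase1_eq (nums : List Int) (i : Nat) (hle : i ≤ nums.length) :
    (if phase1 nums nums.length i == nums.length then false
     else phase3 nums nums.length (phase2 nums nums.length (phase1 nums nums.length i)))
    = decide (runsB false (nums.drop i) = 1) := by
  by_cases h : i < nums.length
  · have hd : nums.drop i = nums[i] :: nums.drop (i + 1) := List.drop_eq_getElem_cons h
    have hg : nums.getD i 0 = nums[i] := List.getD_eq_getElem nums 0 h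
    by_cases h1 : nums[i] = (1 : Int)
    · have hp : phase1 nums nums.length i = i := by
        rw [phase1, dif_pos h, hg, if_neg (by simp [h1])]
      have hp2 : phase2 nums nums.length i = phase2 nums nums.length (i + 1) := by
        rw [phase2, dif_pos h, hg, if_pos (by simp [h1])]
      rw [hp, hp2]
      rw [if_neg (by simp only [beq_iff_eq]; omega)]
      rw [phase2_eq nums (i + 1)]
      rw [decide_eq_decide, hd]
      simp only [runsB, h1]
      simp
    · have hp : phase1 nums nums.length i = phase1 nums nums.length (i + 1) := by
        rw [phase1, dif_pos h, hg, if_pos (by simp [h1])]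
      rw [hp]
      rw [phase1_eq nums (i + 1) (by omega)]
      rw [decide_eq_decide, hd]
      simp only [runsB]
      rw [show (nums[i] == (1:Int)) = false from by simp [h1]]
      simp [h1]
  · have hin : i = nums.length := by omega
    subst hin
    have hp : phase1 nums nums.length nums.length = nums.length := by
      rw [phase1, dif_neg h]
    rw [hp, if_pos (by simp)]
    rw [List.drop_length]
    simp [runsB]
termination_by nums.length - i

theorem solve_eq_runs (nums : List Int) : solve nums = decide (runsB false nums = 1) := by
  rw [solve, solveLoop_eq nums 0 none (by omega) (by omega)]
  norm_num

theorem solve_alt_eq_runs (nums : List Int) : solve_alt nums = decide (runsB false nums = 1) := by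
  have := phase1_eq nums 0 (by omega)
  simpa [solve_alt] using this

-- ===== VERDICT (by name: the statement is the Claim_ definition above) =====
theorem solve_spec : Claim_equal_solve := by
  intro nums _
  unfold Spec_solve
  rw [solve_eq_runs, solve_alt_eq_runs]
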